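-- pv_equiv track=rewrite | github.com/Mohanprasath-R/RMS | utils.py | group_positions_by_symbol
-- ===== SOURCE A (Python) =====
-- from typing import Dict, List, Optional
--
-- def group_positions_by_symbol(positions: List[Dict]) -> Dict[str, List[Dict]]:
--     """Group positions by symbol"""
--     grouped = {}
--
--     for position in positions:
--         symbol = position.get('symbol', 'UNKNOWN')
--         if symbol not in grouped:
--             grouped[symbol] = []
--         grouped[symbol].append(position)
--
--     return grouped
-- ===== SOURCE B (Python) =====
-- def group_positions_by_symbol(positions):
--     """Group positions by symbol"""
--     keys = list(dict.fromkeys(p.get('symbol', 'UNKNOWN') for p in positions))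
--     return {k: [p for p in positions if p.get('symbol', 'UNKNOWN') == k] for k in keys}
-- ===== Notes on version B (the rewrite author's own statement) =====
-- stated objective: alternative
-- what changed: Replaces the single-pass mutable bucket accumulation with a two-pass scheme: first an ordered dedup of the symbols, then one filtering pass of the input per distinct symbol, building the result dict via a comprehension.
import Mathlib
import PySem

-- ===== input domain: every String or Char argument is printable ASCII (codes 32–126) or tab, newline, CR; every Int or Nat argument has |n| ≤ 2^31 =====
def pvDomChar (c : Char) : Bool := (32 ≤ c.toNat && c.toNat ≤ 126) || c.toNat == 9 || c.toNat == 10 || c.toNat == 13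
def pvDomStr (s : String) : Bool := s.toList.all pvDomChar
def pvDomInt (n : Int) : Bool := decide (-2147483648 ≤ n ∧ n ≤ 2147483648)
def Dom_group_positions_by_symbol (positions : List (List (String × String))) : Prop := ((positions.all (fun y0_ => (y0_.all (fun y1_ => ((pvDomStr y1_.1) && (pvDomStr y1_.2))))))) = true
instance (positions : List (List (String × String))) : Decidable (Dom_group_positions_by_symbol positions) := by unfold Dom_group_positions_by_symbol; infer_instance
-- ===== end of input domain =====

-- B replaces A's single-pass mutable bucket accumulation with an ordered dedup of the
-- symbols followed by one filtering pass per distinct symbol (objective: alternative).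

-- ===== PORT A =====
-- a single pass: grouped[symbol] gets a fresh [] on first sight, then the position is appended
def group_positions_by_symbol (positions : List (List (String × String))) : List (String × List (List (String × String))) :=
  (positions.foldl
    (fun grouped position =>
      let symbol := (PySem.Dict.mk position).getD "symbol" "UNKNOWN"
      let grouped := if grouped.contains symbol then grouped else grouped.insert symbol []
      grouped.insert symbol (grouped.getD symbol [] ++ [position]))
    PySem.Dict.empty).items

-- ===== PORT B =====
-- ordered dedup of the symbols, then one filter of the whole input per distinct symbol
def group_positions_by_symbol_alt (positions : List (List (String × String))) : List (String × List (List (String × String))) :=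
  let keys := PySem.List.dedup (positions.map (fun p => (PySem.Dict.mk p).getD "symbol" "UNKNOWN"))
  keys.map (fun k => (k, positions.filter (fun p => (PySem.Dict.mk p).getD "symbol" "UNKNOWN" == k)))

-- ===== PRECONDITION & SPEC =====
def Spec_group_positions_by_symbol (positions : List (List (String × String))) (out : List (String × List (List (String × String)))) : Prop := out = group_positions_by_symbol_alt positions
instance (positions : List (List (String × String))) (out : List (String × List (List (String × String)))) : Decidable (Spec_group_positions_by_symbol positions out) := by unfold Spec_group_positions_by_symbol; infer_instance

-- ===== CLAIM (what is proved, stated in full; the proofs are below) =====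
def Claim_equal_group_positions_by_symbol : Prop := ∀ (positions : List (List (String × String))), Dom_group_positions_by_symbol positions → Spec_group_positions_by_symbol positions (group_positions_by_symbol positions)

-- ===== LEMMAS AND PROOFS =====

-- the key-extraction function both ports use
def pvKey (p : List (String × String)) : String := (PySem.Dict.mk p).getD "symbol" "UNKNOWN"

-- A's loop body is exactly a modify at the extracted key
theorem pv_step_eq_modify (d : PySem.Dict String (List (List (String × String)))) (p : List (String × String)) :
    (let symbol := (PySem.Dict.mk p).getD "symbol" "UNKNOWN"
     let d' := if d.contains symbol then d else d.insert symbol []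
     d'.insert symbol (d'.getD symbol [] ++ [p]))
    = d.modify (pvKey p) [] (· ++ [p]) := by
  simp only [pvKey, PySem.Dict.modify]
  by_cases h : d.contains ((PySem.Dict.mk p).getD "symbol" "UNKNOWN") = true
  · simp [h]
  · simp only [Bool.not_eq_true] at h
    simp [h, PySem.Dict.insert_insert_self, PySem.Dict.getD_of_not_contains d [] h]

-- ===== VERDICT (by name: the statement is the Claim_ definition above) =====
theorem group_positions_by_symbol_spec : Claim_equal_group_positions_by_symbol := by
  intro positions _
  show group_positions_by_symbol positions = group_positions_by_symbol_alt positions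
  unfold group_positions_by_symbol group_positions_by_symbol_alt
  have hstep : positions.foldl
      (fun grouped position =>
        let symbol := (PySem.Dict.mk position).getD "symbol" "UNKNOWN"
        let grouped := if grouped.contains symbol then grouped else grouped.insert symbol []
        grouped.insert symbol (grouped.getD symbol [] ++ [position]))
      PySem.Dict.empty
      = (positions.map (fun p => (pvKey p, p))).foldl
          (fun d q => d.modify q.1 [] (· ++ [q.2])) PySem.Dict.empty := by
    rw [List.foldl_map]
    apply List.foldl_ext
    intros
    exact pv_step_eq_modify _ _
  rw [hstep]
  set l := positions.map (fun p => (pvKey p, p)) with hl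
  have hkeys : ((l.foldl (fun d q => d.modify q.1 [] (· ++ [q.2])) PySem.Dict.empty).keys)
      = PySem.List.dedup (positions.map pvKey) := by
    rw [show (fun (d : PySem.Dict String (List (List (String × String)))) (q : String × List (String × String)) => d.modify q.1 [] (· ++ [q.2]))
          = (fun d q => d.modify ((·.1 : String × List (String × String) → String) q) [] ((fun (_ : PySem.Dict String (List (List (String × String)))) (q : String × List (String × String)) => (· ++ [q.2])) d q)) from rfl]
    rw [PySem.Dict.keys_foldl_modify_key]
    simp [hl, List.map_map, Function.comp_def, PySem.Set.update_nil_left]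
  have hnodup : ((l.foldl (fun d q => d.modify q.1 [] (· ++ [q.2])) PySem.Dict.empty).keys).Nodup := by
    rw [hkeys]; exact PySem.List.nodup_dedup _
  rw [PySem.Dict.items_eq_map_keys _ hnodup [], hkeys]
  apply List.map_congr_left
  intro k _
  congr 1
  rw [PySem.Dict.getD_foldl_modify_append, hl]
  simp only [PySem.Dict.getD_empty, List.nil_append, List.filter_map, List.map_map,
    Function.comp_def, pvKey, List.map_id']
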